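-- pv_equiv track=rewrite | github.com/cyamonide/the-vault | HackerRank/special_palindrome_again.py | getMiddles
-- ===== SOURCE A (Python) =====
-- def getMiddles(n, s):
--     count = 0
--
--     for i, mid in enumerate(s):
--         sideLetter = ''
--         # how far out left/right are reaching
--         for j in range(1, len(s)):
--             # check if any of i-j or i+j are out of range
--             left = i-j
--             right = i+j
--             if left < 0 or right >= len(s):
--                 break
--             # check that the two letters match each other
--             if s[left] != s[right]:
--                 break
--             # check that the two letters are equal to our sideLetter, if it exists
--             if sideLetter == '':
--                 sideLetter = s[left]
--             elif sideLetter != s[left]: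
--                 break
--             # check that the side letter differs from our middle letter
--             if sideLetter == mid:
--                 break # because we'll be double-counting otherwise
--             count += 1
--
--     return count
-- ===== SOURCE B (Python) =====
-- def getMiddles(n, s):
--     # O(len(s)): run lengths to the left and right, then one pass over possible middles.
--     L = []
--     prev = None
--     for ch in s:
--         L.append(L[-1] + 1 if ch == prev else 1)
--         prev = ch
--     R = []
--     prev = None
--     for ch in reversed(s):
--         R.append(R[-1] + 1 if ch == prev else 1)
--         prev = ch
--     R.reverse()
--     total = 0
--     for a, b, c, lw, rw in zip(s, s[1:], s[2:], L, R[2:]):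
--         if a == c and a != b:
--             total += min(lw, rw)
--     return total
-- ===== Notes on version B (the rewrite author's own statement) =====
-- stated objective: alternative
-- what changed: A expands around each center with an inner loop carrying a sideLetter state; B precomputes left/right run-length arrays in two linear passes and then sums min(L[i-1],R[i+1]) over single-character middles in one zip pass.
import Mathlib
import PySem

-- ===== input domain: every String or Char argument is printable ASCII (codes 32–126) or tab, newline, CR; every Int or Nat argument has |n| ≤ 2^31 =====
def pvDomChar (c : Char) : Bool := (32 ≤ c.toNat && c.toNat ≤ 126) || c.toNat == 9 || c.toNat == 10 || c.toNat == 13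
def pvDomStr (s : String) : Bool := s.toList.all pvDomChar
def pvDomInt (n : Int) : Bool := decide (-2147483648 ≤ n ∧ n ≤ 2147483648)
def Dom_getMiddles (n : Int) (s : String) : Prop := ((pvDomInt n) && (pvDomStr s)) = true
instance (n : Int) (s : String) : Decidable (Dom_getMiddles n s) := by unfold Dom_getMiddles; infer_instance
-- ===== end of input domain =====

-- B replaces A's center-expansion loop (with its sideLetter state machine) by run-length
-- precomputation: left/right run-length lists, then one zip pass over the middles taking
-- min of the two run lengths; a genuinely different decomposition of the same count.

-- ===== PORT A =====
-- inner `for j in range(1, len(s))` loop of A, with its breaks; `side` is Python's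
-- sideLetter ('' ↦ none); bounds are checked before indexing, so pyGetD is exact here
def pvAInner (cs : List Char) (mid : Char) (i : Int) : List Int → Option Char → Int → Int
  | [], _, count => count
  | j :: js, side, count =>
    if i - j < 0 ∨ (cs.length : Int) ≤ i + j then count
    else if PySem.List.pyGetD cs (i - j) ' ' ≠ PySem.List.pyGetD cs (i + j) ' ' then count
    else
      match side with
      | none =>
          if PySem.List.pyGetD cs (i - j) ' ' = mid then count
          else pvAInner cs mid i js (some (PySem.List.pyGetD cs (i - j) ' ')) (count + 1)
      | some c =>
          if c ≠ PySem.List.pyGetD cs (i - j) ' ' then count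
          else if c = mid then count
          else pvAInner cs mid i js (some c) (count + 1)

def getMiddles (n : Int) (s : String) : Int :=
  (PySem.List.enumerate s.toList 0).foldl
    (fun count im =>
      pvAInner s.toList im.2 im.1 (PySem.List.pyRange 1 (s.toList.length : Int) 1) none count)
    0

-- ===== PORT B =====
-- the run-length pass: `L.append(L[-1] + 1 if ch == prev else 1)` (last value carried as `last`)
def pvRuns : List Char → Option Char → Int → List Int
  | [], _, _ => []
  | ch :: rest, prev, last =>
    if prev = some ch then (last + 1) :: pvRuns rest (some ch) (last + 1)
    else (1 : Int) :: pvRuns rest (some ch) 1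

def pvZipLoop : List Char → List Char → List Char → List Int → List Int → Int → Int
  | a :: t1, b :: t2, c :: t3, lw :: t4, rw :: t5, total =>
      pvZipLoop t1 t2 t3 t4 t5 (if a = c ∧ a ≠ b then total + min lw rw else total)
  | _, _, _, _, _, total => total

def getMiddles_alt (n : Int) (s : String) : Int :=
  pvZipLoop s.toList (s.toList.drop 1) (s.toList.drop 2)
    (pvRuns s.toList none 0)
    (((pvRuns s.toList.reverse none 0).reverse).drop 2) 0

-- ===== PRECONDITION & SPEC =====
def Spec_getMiddles (n : Int) (s : String) (out : Int) : Prop := out = getMiddles_alt n s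
instance (n : Int) (s : String) (out : Int) : Decidable (Spec_getMiddles n s out) := by unfold Spec_getMiddles; infer_instance

-- ===== CLAIM (what is proved, stated in full; the proofs are below) =====
def Claim_equal_getMiddles : Prop := ∀ (n : Int) (s : String), Dom_getMiddles n s → Spec_getMiddles n s (getMiddles n s)

-- ===== LEMMAS AND PROOFS =====

def pvLn (cs : List Char) : Nat → Nat
  | 0 => 1
  | p+1 => if cs.getD p ' ' = cs.getD (p+1) ' ' then pvLn cs p + 1 else 1

lemma pvLn_iff (cs : List Char) (p : Nat) (j : Nat) :
    j < pvLn cs p ↔ (j ≤ p ∧ ∀ j' ≤ j, cs.getD (p - j') ' ' = cs.getD p ' ') := by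
  induction p generalizing j with
  | zero =>
    simp [pvLn]
  | succ p ih =>
    simp only [pvLn]
    split
    · rename_i h
      cases j with
      | zero => simp
      | succ t =>
        have := ih t
        constructor
        · intro hlt
          have ht := (ih t).mp (by omega)
          refine ⟨by omega, ?_⟩
          intro j' hj'
          cases j' with
          | zero => simp
          | succ u =>
            have : p + 1 - (u+1) = p - u := by omega
            rw [this, ← h]
            exact ht.2 u (by omega)
        · rintro ⟨hle, hall⟩
          have : t < pvLn cs p := by
            apply (ih t).mpr
            refine ⟨by omega, ?_⟩
            intro u hu
            have := hall (u+1) (by omega)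
            rw [show p + 1 - (u+1) = p - u by omega] at this
            rw [this, h]
          omega
    · rename_i h
      cases j with
      | zero => simp
      | succ t =>
        simp only [show ¬ (t+1 < 1) by omega, false_iff]
        rintro ⟨hle, hall⟩
        exact h (by simpa using hall 1 (by omega))

lemma pvGetD_reverse (cs : List Char) (x : Nat) (hx : x < cs.length) :
    cs.reverse.getD (cs.length - 1 - x) ' ' = cs.getD x ' ' := by
  rw [List.getD_eq_getElem _ _ (by simpa using by omega), List.getD_eq_getElem _ _ hx]
  rw [List.getElem_reverse]
  congr 1
  omega

def pvRn (cs : List Char) (i : Nat) : Nat := pvLn cs.reverse (cs.length - 1 - i)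

lemma pvRn_iff (cs : List Char) (i : Nat) (hi : i < cs.length) (j : Nat) :
    j < pvRn cs i ↔ (i + j < cs.length ∧ ∀ j' ≤ j, cs.getD (i + j') ' ' = cs.getD i ' ') := by
  unfold pvRn
  rw [pvLn_iff]
  rw [pvGetD_reverse cs i hi]
  constructor
  · rintro ⟨hle, hall⟩
    refine ⟨by omega, ?_⟩
    intro j' hj'
    have h := hall j' hj'
    rwa [show cs.length - 1 - i - j' = cs.length - 1 - (i + j') by omega,
        pvGetD_reverse cs (i + j') (by omega)] at h
  · rintro ⟨hb, hall⟩
    refine ⟨by omega, ?_⟩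
    intro j' hj'
    rw [show cs.length - 1 - i - j' = cs.length - 1 - (i + j') by omega,
        pvGetD_reverse cs (i + j') (by omega)]
    exact hall j' hj'

lemma pvLn_pos (cs : List Char) (p : Nat) : 1 ≤ pvLn cs p := by
  cases p <;> simp [pvLn] <;> split <;> omega

lemma pvLn_le (cs : List Char) (p : Nat) : pvLn cs p ≤ p + 1 := by
  induction p with
  | zero => simp [pvLn]
  | succ p ih => simp only [pvLn]; split <;> omega

lemma pvInner_eq (cs : List Char) (mid c : Char) (i : Nat)
    (hi1 : 1 ≤ i) (hi2 : i + 1 < cs.length) (hcm : c ≠ mid)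
    (hl : cs.getD (i-1) ' ' = c) (hr : cs.getD (i+1) ' ' = c) :
    ∀ (fuel j0 : Nat), cs.length - j0 ≤ fuel → 1 ≤ j0 →
    j0 - 1 ≤ min (pvLn cs (i-1)) (pvRn cs (i+1)) →
    (∀ j, 1 ≤ j → j < j0 → cs.getD (i-j) ' ' = c ∧ cs.getD (i+j) ' ' = c) →
    ∀ count, pvAInner cs mid (i:Int) (PySem.List.pyRange (j0:Int) (cs.length:Int) 1) (some c) count
      = count + ((min (pvLn cs (i-1)) (pvRn cs (i+1)) - (j0 - 1) : Nat) : Int) := by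
  intro fuel
  induction fuel with
  | zero =>
    intro j0 hf h1 hmin hinv count
    have hm : cs.length ≤ j0 := by omega
    rw [PySem.List.pyRange_one_eq_nil (by exact_mod_cast hm)]
    have hle := pvLn_le cs (i-1)
    have hz : min (pvLn cs (i-1)) (pvRn cs (i+1)) - (j0-1) = 0 := by omega
    rw [hz]
    simp [pvAInner]
  | succ fuel ih =>
    intro j0 hf h1 hmin hinv count
    by_cases hjm : cs.length ≤ j0
    · rw [PySem.List.pyRange_one_eq_nil (by exact_mod_cast hjm)]
      have hle := pvLn_le cs (i-1)
      have hz : min (pvLn cs (i-1)) (pvRn cs (i+1)) - (j0-1) = 0 := by omega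
      rw [hz]
      simp [pvAInner]
    · push_neg at hjm
      rw [PySem.List.pyRange_one_cons (by exact_mod_cast hjm)]
      simp only [pvAInner]
      by_cases hs : j0 ≤ pvLn cs (i-1) ∧ j0 ≤ pvRn cs (i+1)
      · obtain ⟨hsl, hsr⟩ := hs
        have hlw := (pvLn_iff cs (i-1) (j0-1)).mp (by omega)
        have hrw := (pvRn_iff cs (i+1) (by omega) (j0-1)).mp (by omega)
        have hji : j0 ≤ i := by omega
        have hbound : i + j0 < cs.length := by have := hrw.1; omega
        have hleft : cs.getD (i - j0) ' ' = c := by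
          have h := hlw.2 (j0-1) (le_refl _)
          rw [show i - 1 - (j0-1) = i - j0 by omega] at h
          rw [h, hl]
        have hright : cs.getD (i + j0) ' ' = c := by
          have h := hrw.2 (j0-1) (le_refl _)
          rw [show i + 1 + (j0-1) = i + j0 by omega] at h
          rw [h, hr]
        have e1 : (i:Int) - (j0:Int) = ((i - j0 : Nat):Int) := by omega
        have e2 : (i:Int) + (j0:Int) = ((i + j0 : Nat):Int) := by push_cast; ring
        rw [e1, e2]
        rw [if_neg (show ¬ (((i - j0 : Nat):Int) < 0 ∨ (cs.length:Int) ≤ ((i + j0 : Nat):Int)) by omega)]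
        simp only [PySem.List.pyGetD_natCast, hleft, hright, ne_eq, not_true_eq_false,
          if_false, not_false_eq_true, if_true]
        rw [if_neg hcm]
        rw [show (j0:Int) + 1 = ((j0+1 : Nat):Int) by push_cast; ring]
        rw [ih (j0+1) (by omega) (by omega) (by omega) ?_ (count+1)]
        · have h' : j0 ≤ min (pvLn cs (i-1)) (pvRn cs (i+1)) := by omega
          omega
        · intro j hj1 hj2
          rcases Nat.lt_or_ge j j0 with h|h
          · exact hinv j hj1 h
          · have : j = j0 := by omega
            subst this
            exact ⟨hleft, hright⟩
      · have hminv : min (pvLn cs (i-1)) (pvRn cs (i+1)) = j0 - 1 := by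
          rcases not_and_or.mp hs with h|h <;> omega
        rw [hminv, Nat.sub_self]
        simp only [Nat.cast_zero, add_zero]
        by_cases hb1 : (i:Int) - (j0:Int) < 0 ∨ (cs.length:Int) ≤ (i:Int) + (j0:Int)
        · rw [if_pos hb1]
        · rw [if_neg hb1]
          push_neg at hb1
          have hji : j0 ≤ i := by omega
          have hbound : i + j0 < cs.length := by omega
          have e1 : (i:Int) - (j0:Int) = ((i - j0 : Nat):Int) := by omega
          have e2 : (i:Int) + (j0:Int) = ((i + j0 : Nat):Int) := by push_cast; ring
          rw [e1, e2]
          simp only [PySem.List.pyGetD_natCast]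
          by_cases h3 : cs.getD (i-j0) ' ' = cs.getD (i+j0) ' '
          · rw [if_neg (not_not_intro h3)]
            by_cases h4 : c = cs.getD (i-j0) ' '
            · exfalso
              have hlc : cs.getD (i-j0) ' ' = c := h4.symm
              have hrc : cs.getD (i+j0) ' ' = c := by rw [← h3]; exact hlc
              have hLW : j0 - 1 < pvLn cs (i-1) := by
                apply (pvLn_iff _ _ _).mpr
                refine ⟨by omega, ?_⟩
                intro j' hj'
                rw [hl]
                cases j' with
                | zero => simpa using hl
                | succ u =>
                  rw [show i - 1 - (u+1) = i - (u+2) by omega]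
                  rcases Nat.lt_or_ge (u+2) j0 with hu|hu
                  · exact (hinv (u+2) (by omega) hu).1
                  · rw [show u + 2 = j0 by omega]
                    exact hlc
              have hRW : j0 - 1 < pvRn cs (i+1) := by
                apply (pvRn_iff _ _ (by omega) _).mpr
                refine ⟨by omega, ?_⟩
                intro j' hj'
                rw [hr]
                cases j' with
                | zero => simpa using hr
                | succ u =>
                  rw [show i + 1 + (u+1) = i + (u+2) by omega]
                  rcases Nat.lt_or_ge (u+2) j0 with hu|hu
                  · exact (hinv (u+2) (by omega) hu).2
                  · rw [show u + 2 = j0 by omega]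
                    exact hrc
              exact hs ⟨by omega, by omega⟩
            · rw [if_pos h4]
          · rw [if_pos h3]

def pvSpecF (cs : List Char) (i : Nat) : Int :=
  if 1 ≤ i ∧ i + 1 < cs.length ∧ cs.getD (i-1) ' ' = cs.getD (i+1) ' '
      ∧ cs.getD (i-1) ' ' ≠ cs.getD i ' '
  then ((min (pvLn cs (i-1)) (pvRn cs (i+1)) : Nat) : Int) else 0

lemma pvPerIndex (cs : List Char) (i : Nat) (hi : i < cs.length) (count : Int) :
    pvAInner cs (cs.getD i ' ') (i:Int) (PySem.List.pyRange 1 (cs.length:Int) 1) none count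
      = count + pvSpecF cs i := by
  by_cases hm : cs.length ≤ 1
  · rw [PySem.List.pyRange_one_eq_nil (by exact_mod_cast hm)]
    have : pvSpecF cs i = 0 := by unfold pvSpecF; rw [if_neg (by omega)]
    rw [this]
    simp [pvAInner]
  · push_neg at hm
    rw [PySem.List.pyRange_one_cons (by exact_mod_cast hm)]
    simp only [pvAInner]
    by_cases hb : (i:Int) - 1 < 0 ∨ (cs.length:Int) ≤ (i:Int) + 1
    · rw [if_pos hb]
      have : pvSpecF cs i = 0 := by unfold pvSpecF; rw [if_neg (by omega)]
      rw [this, add_zero]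
    · rw [if_neg hb]
      push_neg at hb
      have hi1 : 1 ≤ i := by omega
      have hi2 : i + 1 < cs.length := by omega
      have e1 : (i:Int) - (1:Int) = ((i - 1 : Nat):Int) := by omega
      have e2 : (i:Int) + (1:Int) = ((i + 1 : Nat):Int) := by push_cast; ring
      rw [e1, e2]
      simp only [PySem.List.pyGetD_natCast]
      by_cases h3 : cs.getD (i-1) ' ' = cs.getD (i+1) ' '
      · rw [if_neg (not_not_intro h3)]
        by_cases h4 : cs.getD (i-1) ' ' = cs.getD i ' '
        · rw [if_pos h4]
          have : pvSpecF cs i = 0 := by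
            unfold pvSpecF; rw [if_neg (by intro h; exact h.2.2.2 h4)]
          rw [this, add_zero]
        · rw [if_neg h4]
          rw [show (1:Int) + 1 = ((2:Nat):Int) by norm_num]
          rw [pvInner_eq cs (cs.getD i ' ') (cs.getD (i-1) ' ') i hi1 hi2 h4 rfl h3.symm
            cs.length 2 (by omega) (by omega)
            (by
              have h1 := pvLn_pos cs (i-1)
              have h2 : 1 ≤ pvRn cs (i+1) := pvLn_pos cs.reverse (cs.length - 1 - (i+1))
              omega)
            (by
              intro j hj1 hj2
              have : j = 1 := by omega
              subst this
              exact ⟨rfl, h3.symm⟩) (count + 1)]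
          have hspec : pvSpecF cs i
              = ((min (pvLn cs (i-1)) (pvRn cs (i+1)) : Nat) : Int) := by
            unfold pvSpecF; rw [if_pos ⟨hi1, hi2, h3, h4⟩]
          rw [hspec]
          have h1 := pvLn_pos cs (i-1)
          have h2 : 1 ≤ pvRn cs (i+1) := pvLn_pos cs.reverse (cs.length - 1 - (i+1))
          omega
      · rw [if_pos h3]
        have : pvSpecF cs i = 0 := by
          unfold pvSpecF; rw [if_neg (by intro h; exact h3 h.2.2.1)]
        rw [this, add_zero]

lemma pvA_eq_sum (n : Int) (s : String) :
    getMiddles n s = ((List.range s.toList.length).map (pvSpecF s.toList)).sum := by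
  unfold getMiddles
  rw [PySem.List.enumerate_eq_map_pyRange s.toList ' ']
  rw [List.foldl_map]
  rw [show PySem.List.len s.toList = (s.toList.length : Int) from PySem.List.len_eq s.toList]
  rw [PySem.List.pyRange_zero_natCast]
  rw [List.foldl_map]
  rw [PySem.List.foldl_congr_mem _ _
    (fun count k => count + pvSpecF s.toList k) 0 ?_]
  · rw [PySem.List.foldl_add]; ring
  · intro acc k hk
    simp only [PySem.List.pyGetD_natCast]
    exact pvPerIndex s.toList k (List.mem_range.mp hk) acc

lemma pvRuns_go (cs : List Char) : ∀ (fuel k : Nat), cs.length - k ≤ fuel → 1 ≤ k → k ≤ cs.length →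
    pvRuns (cs.drop k) (some (cs.getD (k-1) ' ')) ((pvLn cs (k-1) : Int))
      = (List.range' k (cs.length - k)).map (fun p => (pvLn cs p : Int)) := by
  intro fuel
  induction fuel with
  | zero =>
    intro k hf h1 hk
    have : k = cs.length := by omega
    subst this
    rw [List.drop_eq_nil_of_le le_rfl, Nat.sub_self]
    rfl
  | succ fuel ih =>
    intro k hf h1 hk
    by_cases hkm : cs.length ≤ k
    · have : k = cs.length := by omega
      subst this
      rw [List.drop_eq_nil_of_le le_rfl, Nat.sub_self]
      rfl
    · push_neg at hkm
      obtain ⟨k', rfl⟩ : ∃ k', k = k'+1 := ⟨k-1, by omega⟩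
      rw [show k'+1-1 = k' by omega]
      rw [List.drop_eq_getElem_cons hkm]
      simp only [pvRuns]
      have hget : cs[k'+1] = cs.getD (k'+1) ' ' := (List.getD_eq_getElem _ _ hkm).symm
      have hrange : List.range' (k'+1) (cs.length - (k'+1))
          = (k'+1) :: List.range' (k'+2) (cs.length - (k'+2)) := by
        rw [show cs.length - (k'+1) = (cs.length - (k'+2)) + 1 by omega, List.range'_succ]
      rw [hrange, List.map_cons]
      have hnext := ih (k'+2) (by omega) (by omega) (by omega)
      rw [show k'+2-1 = k'+1 by omega] at hnext
      by_cases h : cs.getD k' ' ' = cs.getD (k'+1) ' '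
      · rw [if_pos (by rw [hget, h])]
        have hv : pvLn cs (k'+1) = pvLn cs k' + 1 := by simp only [pvLn]; rw [if_pos h]
        rw [hget]
        rw [show (pvLn cs k' : Int) + 1 = (pvLn cs (k'+1) : Int) by rw [hv]; push_cast; ring]
        rw [show k'+1+1 = k'+2 by omega, hnext]
      · rw [if_neg (by rw [hget]; simpa using h)]
        have hv : pvLn cs (k'+1) = 1 := by simp only [pvLn]; rw [if_neg h]
        rw [hget]
        rw [show (1 : Int) = (pvLn cs (k'+1) : Int) by rw [hv]; simp]
        rw [show k'+1+1 = k'+2 by omega, hnext]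

lemma pvRuns_eq (cs : List Char) :
    pvRuns cs none 0 = (List.range cs.length).map (fun p => (pvLn cs p : Int)) := by
  cases cs with
  | nil => rfl
  | cons c0 rest =>
    have hgo := pvRuns_go (c0 :: rest) (c0 :: rest).length 1 (by omega) le_rfl (by simp)
    rw [show (1:Nat) - 1 = 0 from rfl] at hgo
    simp only [List.drop_one, List.tail_cons] at hgo
    have h1 : pvLn (c0 :: rest) 0 = 1 := rfl
    have hgd : (c0 :: rest).getD 0 ' ' = c0 := rfl
    rw [h1, hgd] at hgo
    simp only [Nat.cast_one] at hgo
    simp only [pvRuns, if_neg (show ¬ (none : Option Char) = some c0 by simp)]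
    rw [List.range_eq_range',
      show (c0 :: rest).length = ((c0 :: rest).length - 1) + 1 by simp,
      List.range'_succ, List.map_cons, h1]
    rw [show (0:Nat) + 1 = 1 from rfl, hgo]
    simp

lemma pvZip_nil3 (l1 l2 : List Char) (l4 l5 : List Int) (total : Int) :
    pvZipLoop l1 l2 [] l4 l5 total = total := by
  cases l1 <;> cases l2 <;> rfl

lemma pvDropRange' : ∀ (k a n : Nat), (List.range' a n).drop k = List.range' (a+k) (n-k) := by
  intro k
  induction k with
  | zero => intro a n; simp
  | succ k ih =>
    intro a n
    cases n with
    | zero => simp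
    | succ n =>
      rw [List.range'_succ, List.drop_succ_cons, ih]
      congr 1 <;> omega

lemma pvZip_eq (cs : List Char) : ∀ (fuel k : Nat), cs.length - k ≤ fuel → ∀ (total : Int),
    pvZipLoop (cs.drop k) (cs.drop (k+1)) (cs.drop (k+2))
      ((List.range' k (cs.length - k)).map (fun p => (pvLn cs p : Int)))
      ((List.range' (k+2) (cs.length - (k+2))).map (fun p => (pvRn cs p : Int))) total
    = total + ((List.range' (k+1) (cs.length - (k+2))).map (pvSpecF cs)).sum := by
  intro fuel
  induction fuel with
  | zero =>
    intro k hf total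
    rw [show cs.drop (k+2) = [] from List.drop_eq_nil_of_le (by omega), pvZip_nil3,
      show cs.length - (k+2) = 0 by omega]
    simp
  | succ fuel ih =>
    intro k hf total
    by_cases hm : cs.length ≤ k + 2
    · rw [show cs.drop (k+2) = [] from List.drop_eq_nil_of_le (by omega), pvZip_nil3,
        show cs.length - (k+2) = 0 by omega]
      simp
    · push_neg at hm
      have hk : k < cs.length := by omega
      have hk1 : k+1 < cs.length := by omega
      have hk2 : k+2 < cs.length := by omega
      have d1 : cs.drop k = cs.getD k ' ' :: cs.drop (k+1) := by
        rw [List.drop_eq_getElem_cons hk, List.getD_eq_getElem _ _ hk]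
      have d2 : cs.drop (k+1) = cs.getD (k+1) ' ' :: cs.drop (k+2) := by
        rw [List.drop_eq_getElem_cons hk1, List.getD_eq_getElem _ _ hk1, show k+1+1 = k+2 by omega]
      have d3 : cs.drop (k+2) = cs.getD (k+2) ' ' :: cs.drop (k+3) := by
        rw [List.drop_eq_getElem_cons hk2, List.getD_eq_getElem _ _ hk2, show k+2+1 = k+3 by omega]
      have r1 : List.range' k (cs.length - k) = k :: List.range' (k+1) (cs.length - (k+1)) := by
        rw [show cs.length - k = (cs.length - (k+1)) + 1 by omega, List.range'_succ]
      have r5 : List.range' (k+2) (cs.length - (k+2))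
          = (k+2) :: List.range' (k+3) (cs.length - (k+3)) := by
        rw [show cs.length - (k+2) = (cs.length - (k+3)) + 1 by omega, List.range'_succ]
      have r4 : List.range' (k+1) (cs.length - (k+2))
          = (k+1) :: List.range' (k+2) (cs.length - (k+3)) := by
        rw [show cs.length - (k+2) = (cs.length - (k+3)) + 1 by omega, List.range'_succ]
      rw [d1, d2, d3, r1, r5, r4, List.map_cons, List.map_cons, List.map_cons, List.sum_cons]
      simp only [pvZipLoop]
      rw [← d3, ← d2]
      have hnext := ih (k+1) (by omega)
        (if cs.getD k ' ' = cs.getD (k+2) ' ' ∧ cs.getD k ' ' ≠ cs.getD (k+1) ' '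
         then total + min ((pvLn cs k : Nat) : Int) ((pvRn cs (k+2) : Nat) : Int) else total)
      rw [show k+1+1 = k+2 by omega, show k+1+2 = k+3 by omega] at hnext
      rw [hnext]
      have hspec : pvSpecF cs (k+1)
          = if cs.getD k ' ' = cs.getD (k+2) ' ' ∧ cs.getD k ' ' ≠ cs.getD (k+1) ' '
            then ((min (pvLn cs k) (pvRn cs (k+2)) : Nat) : Int) else 0 := by
        unfold pvSpecF
        rw [show k+1-1 = k by omega, show k+1+1 = k+2 by omega]
        by_cases h : cs.getD k ' ' = cs.getD (k+2) ' ' ∧ cs.getD k ' ' ≠ cs.getD (k+1) ' '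
        · rw [if_pos ⟨by omega, by omega, h.1, h.2⟩, if_pos h]
        · rw [if_neg (by intro hx; exact h ⟨hx.2.2.1, hx.2.2.2⟩), if_neg h]
      rw [hspec]
      by_cases h : cs.getD k ' ' = cs.getD (k+2) ' ' ∧ cs.getD k ' ' ≠ cs.getD (k+1) ' '
      · rw [if_pos h, if_pos h]
        push_cast [Nat.cast_min]
        ring
      · rw [if_neg h, if_neg h]
        ring

lemma pvB_eq_sum (n : Int) (s : String) :
    getMiddles_alt n s = ((List.range' 1 (s.toList.length - 2)).map (pvSpecF s.toList)).sum := by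
  unfold getMiddles_alt
  have hR : ((pvRuns s.toList.reverse none 0).reverse).drop 2
      = (List.range' 2 (s.toList.length - 2)).map (fun p => (pvRn s.toList p : Int)) := by
    rw [pvRuns_eq, List.length_reverse, ← List.map_reverse, List.range_eq_range',
      List.reverse_range', List.map_map, ← List.map_drop, List.range_eq_range',
      pvDropRange', show (0:Nat)+2 = 2 from rfl]
    apply List.map_congr_left
    intro x hx
    have hxm : x < s.toList.length := by
      have := List.mem_range'.mp hx
      omega
    simp only [Function.comp]
    unfold pvRn
    congr 2
    omega
  have hL : pvRuns s.toList none 0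
      = (List.range' 0 s.toList.length).map (fun p => (pvLn s.toList p : Int)) := by
    rw [pvRuns_eq, List.range_eq_range']
  have hz := pvZip_eq s.toList s.toList.length 0 (by omega) 0
  simp only [List.drop_zero, zero_add, Nat.sub_zero] at hz
  rw [hL, hR]
  exact hz

lemma pvSpecF_zero_of (cs : List Char) (i : Nat)
    (h : ¬ (1 ≤ i ∧ i + 1 < cs.length)) : pvSpecF cs i = 0 := by
  unfold pvSpecF
  rw [if_neg (by intro hx; exact h ⟨hx.1, hx.2.1⟩)]

theorem getMiddles_spec' (n : Int) (s : String) : getMiddles n s = getMiddles_alt n s := by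
  rw [pvA_eq_sum n s, pvB_eq_sum n s]
  by_cases h2 : s.toList.length < 2
  · interval_cases hh : s.toList.length
    · simp
    · simp [List.range_one, pvSpecF_zero_of s.toList 0 (by omega)]
  · push_neg at h2
    rw [List.range_eq_range',
      show s.toList.length = (s.toList.length - 1) + 1 by omega]
    rw [show List.range' 0 ((s.toList.length - 1) + 1)
        = 0 :: List.range' 1 (s.toList.length - 1) by rw [List.range'_succ]]
    rw [show s.toList.length - 1 = (s.toList.length - 2) + 1 by omega, List.range'_1_concat,
      List.map_cons, List.sum_cons, List.map_append, List.sum_append]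
    rw [pvSpecF_zero_of _ 0 (by omega)]
    rw [List.map_singleton, List.sum_singleton,
      pvSpecF_zero_of _ (1 + (s.toList.length - 2)) (by omega)]
    simp

-- ===== VERDICT (by name: the statement is the Claim_ definition above) =====
theorem getMiddles_spec : Claim_equal_getMiddles := by
  intro n s _
  exact getMiddles_spec' n s
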